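-- pv_equiv track=rewrite | github.com/emirhanyucel/ProjectEuler | problem06.py | squareOfSum
-- ===== SOURCE A (Python) =====
-- def squareOfSum(n):
--     sum2 = 0
--     i = 1
--     while i <= n:
--         sum2 += i           # <- this function gives the square of the sum of numbers from 1 to n.
--         i += 1
--
--     sum3 = sum2 * sum2
--     return sum3
-- ===== SOURCE B (Python) =====
-- def squareOfSum(n):
--     # closed form: sum 1..n = n(n+1)/2 (0 when n <= 0)
--     s = n * (n + 1) // 2 if n > 0 else 0
--     return s * s
-- ===== Notes on version B (the rewrite author's own statement) =====
-- stated objective: faster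
-- what changed: Replaced the O(n) accumulation loop with the closed form (n(n+1)/2)^2.
import Mathlib
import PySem

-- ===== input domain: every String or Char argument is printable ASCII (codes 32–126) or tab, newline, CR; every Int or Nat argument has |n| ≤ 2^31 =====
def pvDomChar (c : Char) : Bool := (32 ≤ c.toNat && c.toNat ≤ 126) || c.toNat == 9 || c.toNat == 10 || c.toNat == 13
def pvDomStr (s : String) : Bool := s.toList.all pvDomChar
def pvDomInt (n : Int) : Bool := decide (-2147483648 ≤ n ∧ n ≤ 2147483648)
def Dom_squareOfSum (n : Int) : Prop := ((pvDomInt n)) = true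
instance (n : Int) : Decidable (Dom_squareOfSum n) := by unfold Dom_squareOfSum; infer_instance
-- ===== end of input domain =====

-- B replaces A's O(n) accumulation loop with the closed form (n(n+1)/2)^2 (asymptotically faster).


-- ===== PORT A =====
-- while i <= n: sum2 += i; i += 1
def squareOfSumLoop (n sum2 i : Int) : Int :=
  if i ≤ n then squareOfSumLoop n (sum2 + i) (i + 1) else sum2
termination_by (n + 1 - i).toNat
decreasing_by omega

def squareOfSum (n : Int) : Int :=
  let sum2 := squareOfSumLoop n 0 1
  let sum3 := sum2 * sum2
  sum3

-- ===== PORT B =====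
def squareOfSum_alt (n : Int) : Int :=
  let s := if 0 < n then PySem.Int.floordiv (n * (n + 1)) 2 else 0
  s * s

-- ===== PRECONDITION & SPEC =====
def Spec_squareOfSum (n : Int) (out : Int) : Prop := out = squareOfSum_alt n
instance (n : Int) (out : Int) : Decidable (Spec_squareOfSum n out) := by unfold Spec_squareOfSum; infer_instance

-- ===== CLAIM (what is proved, stated in full; the proofs are below) =====
def Claim_equal_squareOfSum : Prop := ∀ (n : Int), Dom_squareOfSum n → Spec_squareOfSum n (squareOfSum n)

-- ===== LEMMAS AND PROOFS =====
-- Loop invariant: twice the loop's result is 2*sum2 plus the remaining arithmetic series.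
theorem squareOfSumLoop_char_fuel (k : Nat) : ∀ (n sum2 i : Int), (n + 1 - i).toNat = k →
    2 * squareOfSumLoop n sum2 i =
      2 * sum2 + (if i ≤ n then n * (n + 1) - i * (i - 1) else 0) := by
  induction k with
  | zero =>
    intro n sum2 i hk
    have h : ¬ i ≤ n := by omega
    rw [squareOfSumLoop, if_neg h, if_neg h]; omega
  | succ k ih =>
    intro n sum2 i hk
    by_cases h : i ≤ n
    · rw [squareOfSumLoop, if_pos h, ih n (sum2 + i) (i + 1) (by omega)]
      by_cases h2 : i + 1 ≤ n
      · simp [h, h2]; ring_nf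
      · have he : i = n := by omega
        subst he; simp [h2]; ring
    · rw [squareOfSumLoop, if_neg h, if_neg h]; omega

theorem squareOfSumLoop_char (n sum2 i : Int) :
    2 * squareOfSumLoop n sum2 i =
      2 * sum2 + (if i ≤ n then n * (n + 1) - i * (i - 1) else 0) :=
  squareOfSumLoop_char_fuel (n + 1 - i).toNat n sum2 i rfl

-- ===== VERDICT (by name: the statement is the Claim_ definition above) =====
theorem squareOfSum_spec : Claim_equal_squareOfSum := by
  intro n _
  unfold Spec_squareOfSum squareOfSum squareOfSum_alt
  have h := squareOfSumLoop_char n 0 1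
  by_cases hn : 0 < n
  · have h1 : (1 : Int) ≤ n := hn
    rw [if_pos h1] at h
    have h2 : 2 * squareOfSumLoop n 0 1 = n * (n + 1) := by omega
    have h3 : PySem.Int.floordiv (n * (n + 1)) 2 = squareOfSumLoop n 0 1 := by
      rw [PySem.Int.floordiv_eq_ediv_of_pos (by omega), ← h2]
      omega
    rw [if_pos hn, h3]
  · have h1 : ¬ (1 : Int) ≤ n := by omega
    rw [if_neg h1] at h
    have h0 : squareOfSumLoop n 0 1 = 0 := by omega
    rw [if_neg hn, h0]
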